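-- pv_equiv track=rewrite | github.com/ManishShiwlani/Python | findBestAverageGrade.py | maxAvgScore
-- ===== SOURCE A (Python) =====
-- import math
--
-- def maxAvgScore(scores):
--
--     """variable to store the max value of an integer"""
--     maxAvg = -math.inf
--     """if scores is null then return 0"""
--     if not scores: return 0
--     """initialize an empty dictionary for grades"""
--     grades = {}
--
--     """for each name and score in scores tuple"""
--     for name, score in scores:
--         #if name is not in grades dictionary
--         if name not in grades:
--             #then set grades[name] to [0,0]
--             grades[name] = [0, 0]
--         # increment the score for name at first index
--         grades[name][0] += int(score)
--         # increment the name
--         grades[name][1] += 1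
--
--     for val in grades.values():
--         maxAvg = max(maxAvg, val[0] // val[1])
--
--     return maxAvg
-- ===== SOURCE B (Python) =====
-- def maxAvgScore(scores):
--     # Alternative decomposition: collect the distinct names in first-appearance
--     # order, then for each name scan the list once for its scores (no dict of
--     # running (sum, count) pairs).
--     if not scores:
--         return 0
--     names = []
--     for name, _ in scores:
--         if name not in names:
--             names.append(name)
--     best = None
--     for n in names:
--         vals = [int(s) for nm, s in scores if nm == n]
--         avg = sum(vals) // len(vals)
--         if best is None or avg > best:
--             best = avg
--     return best
-- ===== Notes on version B (the rewrite author's own statement) =====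
-- stated objective: alternative
-- what changed: Replaces A's single-pass dict of running (sum,count) pairs by a dedup-names pass followed by a per-name filtering scan with a running max.
import Mathlib
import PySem

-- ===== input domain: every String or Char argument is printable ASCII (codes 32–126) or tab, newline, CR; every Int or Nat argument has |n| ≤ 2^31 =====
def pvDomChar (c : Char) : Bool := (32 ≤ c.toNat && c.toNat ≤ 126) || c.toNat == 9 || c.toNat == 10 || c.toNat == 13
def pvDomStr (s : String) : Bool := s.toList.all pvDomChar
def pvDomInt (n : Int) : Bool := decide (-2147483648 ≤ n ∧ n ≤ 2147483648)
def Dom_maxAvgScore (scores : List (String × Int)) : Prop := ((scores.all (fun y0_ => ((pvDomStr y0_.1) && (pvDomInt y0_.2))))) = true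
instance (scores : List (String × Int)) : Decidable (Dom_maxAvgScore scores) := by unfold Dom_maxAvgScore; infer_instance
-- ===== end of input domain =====

-- B replaces A's one-pass dict of running (sum, count) pairs by a dedup-names pass plus a
-- per-name filtering scan with a running max (alternative decomposition; no speed claim).

-- ===== PORT A =====
-- A's loop body: ensure the name is present with [0, 0], then the two in-place updates.
def mAS_step (d : PySem.Dict String (Int × Int)) (p : String × Int) : PySem.Dict String (Int × Int) :=
  let d1 := if d.contains p.1 then d else d.insert p.1 (0, 0)
  let d2 := d1.modify p.1 (0, 0) (fun v => (v.1 + p.2, v.2))   -- grades[name][0] += int(score)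
  d2.modify p.1 (0, 0) (fun v => (v.1, v.2 + 1))               -- grades[name][1] += 1

def maxAvgScore (scores : List (String × Int)) : Int :=
  if scores = [] then 0
  else
    let grades := scores.foldl mAS_step PySem.Dict.empty
    -- maxAvg starts at -math.inf, modelled as `none`; max(-inf, x) = x
    let maxAvg : Option Int := grades.values.foldl
      (fun m v => match m with
        | none => some (PySem.Int.floordiv v.1 v.2)
        | some m => some (max m (PySem.Int.floordiv v.1 v.2))) none
    maxAvg.getD 0  -- `none` is unreachable here: scores ≠ [] so grades is nonempty

-- ===== PORT B =====
def maxAvgScore_alt (scores : List (String × Int)) : Int :=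
  if scores = [] then 0
  else
    -- names: distinct names in first-appearance order (Source B's membership-test loop)
    let names : PySem.Set String := PySem.Set.ofList (scores.map Prod.fst)
    let best : Option Int := names.foldl
      (fun best n =>
        let vals := (scores.filter (fun p => p.1 == n)).map Prod.snd
        let avg := PySem.Int.floordiv vals.sum (vals.length : Int)
        match best with
        | none => some avg
        | some b => if avg > b then some avg else some b) none
    best.getD 0  -- `none` is unreachable here: names is nonempty

-- ===== PRECONDITION & SPEC =====
def Spec_maxAvgScore (scores : List (String × Int)) (out : Int) : Prop := out = maxAvgScore_alt scores
instance (scores : List (String × Int)) (out : Int) : Decidable (Spec_maxAvgScore scores out) := by unfold Spec_maxAvgScore; infer_instance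

-- ===== CLAIM (what is proved, stated in full; the proofs are below) =====
def Claim_equal_maxAvgScore : Prop := ∀ (scores : List (String × Int)), Dom_maxAvgScore scores → Spec_maxAvgScore scores (maxAvgScore scores)

-- ===== LEMMAS AND PROOFS =====

-- modify at an existing key leaves the key list unchanged
theorem mAS_keys_modify_contained (d : PySem.Dict String (Int × Int)) (k : String)
    (f : Int × Int → Int × Int) (h : d.contains k = true) :
    (d.modify k (0, 0) f).keys = d.keys := by
  rw [PySem.Dict.keys_modify, PySem.Dict.keys_insert_of_contains _ _ h]

-- one step of A's loop adds p.1 to the key set (in first-insertion order)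
theorem mAS_keys_step (d : PySem.Dict String (Int × Int)) (p : String × Int) :
    (mAS_step d p).keys = PySem.Set.add d.keys p.1 := by
  unfold mAS_step PySem.Set.add
  by_cases h : d.contains p.1 = true
  · simp only [h, if_true]
    rw [mAS_keys_modify_contained, mAS_keys_modify_contained _ _ _ h, if_pos]
    · rw [PySem.Dict.contains_eq_decide_mem_keys] at h
      simpa using h
    · simp [PySem.Dict.contains_modify, h]
  · simp only [h, Bool.false_eq_true, if_false]
    rw [mAS_keys_modify_contained, mAS_keys_modify_contained,
        PySem.Dict.keys_insert_of_not_contains _ _ (by simpa using h), if_neg]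
    · rw [PySem.Dict.contains_eq_decide_mem_keys] at h
      simpa using h
    · exact PySem.Dict.contains_insert_self _ _ _
    · simp [PySem.Dict.contains_modify, PySem.Dict.contains_insert_self]

-- one step of A's loop on the stored (sum, count) pair
theorem mAS_getD_step (d : PySem.Dict String (Int × Int)) (p : String × Int) (n : String) :
    (mAS_step d p).getD n (0, 0) =
      if n = p.1 then ((d.getD n (0, 0)).1 + p.2, (d.getD n (0, 0)).2 + 1)
      else d.getD n (0, 0) := by
  unfold mAS_step
  by_cases h : d.contains p.1 = true
  · simp only [h, if_true, PySem.Dict.getD_modify]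
    by_cases hn : n = p.1 <;> simp [hn]
  · simp only [h, Bool.false_eq_true, if_false, PySem.Dict.getD_modify, PySem.Dict.getD_insert]
    by_cases hn : n = p.1 <;>
      simp [hn, PySem.Dict.getD_of_not_contains _ ((0:Int),(0:Int)) (by simpa using h)]

theorem mAS_keys_fold (l : List (String × Int)) (d : PySem.Dict String (Int × Int)) :
    (l.foldl mAS_step d).keys = PySem.Set.update d.keys (l.map Prod.fst) := by
  induction l generalizing d with
  | nil => rfl
  | cons p t ih =>
    simp only [List.foldl_cons, List.map_cons]
    rw [ih, mAS_keys_step]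
    rfl

-- A's dict stores, per name, the sum and the count of that name's scores
theorem mAS_getD_fold (l : List (String × Int)) (d : PySem.Dict String (Int × Int)) (n : String) :
    (l.foldl mAS_step d).getD n (0, 0) =
      ((d.getD n (0, 0)).1 + ((l.filter (fun p => p.1 == n)).map Prod.snd).sum,
       (d.getD n (0, 0)).2 + ((l.filter (fun p => p.1 == n)).length : Int)) := by
  induction l generalizing d with
  | nil => simp
  | cons p t ih =>
    simp only [List.foldl_cons, List.filter_cons]
    rw [ih, mAS_getD_step]
    by_cases hn : p.1 = n
    · simp only [hn, beq_self_eq_true, if_true, List.map_cons, List.sum_cons, List.length_cons]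
      simp
      constructor <;> ring
    · simp only [beq_iff_eq, hn, if_false, if_neg (fun h : n = p.1 => hn h.symm)]

-- A's key list is B's dedup of the names
theorem mAS_keys_eq_names (l : List (String × Int)) :
    (l.foldl mAS_step PySem.Dict.empty).keys = PySem.Set.ofList (l.map Prod.fst) := by
  rw [mAS_keys_fold, PySem.Set.ofList_eq_foldl]
  rfl

-- ===== VERDICT (by name: the statement is the Claim_ definition above) =====
theorem maxAvgScore_spec : Claim_equal_maxAvgScore := by
  intro scores _
  unfold Spec_maxAvgScore maxAvgScore maxAvgScore_alt
  by_cases hs : scores = []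
  · simp [hs]
  · simp only [if_neg hs]
    have hkeys := mAS_keys_eq_names scores
    have hnd : (scores.foldl mAS_step PySem.Dict.empty).keys.Nodup := by
      rw [hkeys]; exact PySem.Set.nodup_ofList _
    rw [PySem.Dict.values_eq_map_keys _ hnd ((0 : Int), (0 : Int)), hkeys, List.foldl_map]
    congr 1
    apply PySem.List.foldl_congr_mem
    intro acc n hn
    rw [mAS_getD_fold]
    simp only [PySem.Dict.getD_empty, zero_add, List.length_map]
    cases acc with
    | none => rfl
    | some b =>
      simp only []
      rw [max_def]
      split_ifs <;> simp <;> omega
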